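-- pv_equiv track=rewrite | github.com/shiveshsky/datastructures | contest_II/a-b.py | solve
-- ===== SOURCE A (Python) =====
-- def solve(A, B, C):
--     dix = {}
--     for i in A:
--         val = (i ** 3) % C - ((i % C * B % C) % C)
--         if dix.get(val):
--             dix.update({val: dix[val] + 1})
--         else:
--             dix[val] = 1
--     ans = max(dix, key=dix.get)
--     return dix[ans]
-- ===== SOURCE B (Python) =====
-- def solve(A, B, C):
--     # sort the computed values, then one linear scan for the longest run
--     vals = sorted((i ** 3) % C - ((i % C * B % C) % C) for i in A)
--     best = 0
--     run = 0
--     prev = None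
--     for v in vals:
--         run = run + 1 if v == prev else 1
--         if run > best:
--             best = run
--         prev = v
--     return best
-- ===== Notes on version B (the rewrite author's own statement) =====
-- stated objective: alternative
-- what changed: Replaces the dict counting pass plus max(dict, key=dict.get) by sorting the computed values and one linear scan keeping the longest run of equal values; no dict at all.
import Mathlib
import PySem

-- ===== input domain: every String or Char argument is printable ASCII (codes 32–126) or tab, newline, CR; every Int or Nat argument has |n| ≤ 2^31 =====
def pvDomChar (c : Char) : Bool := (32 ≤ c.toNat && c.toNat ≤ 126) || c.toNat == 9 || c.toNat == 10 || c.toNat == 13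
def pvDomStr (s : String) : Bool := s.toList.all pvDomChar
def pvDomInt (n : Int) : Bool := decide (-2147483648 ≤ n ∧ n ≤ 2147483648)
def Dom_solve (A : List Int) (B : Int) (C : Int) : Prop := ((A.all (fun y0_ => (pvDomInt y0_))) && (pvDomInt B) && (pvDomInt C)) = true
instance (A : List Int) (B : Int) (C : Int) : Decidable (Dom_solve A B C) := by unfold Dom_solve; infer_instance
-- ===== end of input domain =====

-- B replaces A's dict-count pass + max(dict, key=dict.get) with sort-then-longest-run scan (alternative algorithm, no dict).

-- ===== PORT A =====
-- val = (i ** 3) % C - ((i % C * B % C) % C), Python precedence: ((i%C)*B)%C, then %C again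
def pvVal (B : Int) (C : Int) (i : Int) : Int :=
  PySem.Int.mod (i ^ 3) C - PySem.Int.mod (PySem.Int.mod (PySem.Int.mod i C * B) C) C

def solve (A : List Int) (B : Int) (C : Int) : Int :=
  -- the counting loop; `if dix.get(val):` is truthy-None vs a positive count
  let dix : PySem.Dict Int Int := A.foldl (fun d i =>
    let val := pvVal B C i
    if ((d.get? val).getD 0) ≠ 0 then d.insert val (d.getD val 0 + 1)
    else d.insert val 1) PySem.Dict.empty
  -- ans = max(dix, key=dix.get); dix.get on a key of dix is its count (never None)
  match PySem.List.max? dix.keys (fun k => dix.getD k 0) with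
  | some ans => dix.getD ans 0
  | none => 0   -- unreachable under Pre_solve (A ≠ []): Python raises ValueError

-- ===== PORT B =====
def pvStep (st : Int × Int × Option Int) (v : Int) : Int × Int × Option Int :=
  let run := if some v = st.2.2 then st.2.1 + 1 else 1
  (max st.1 run, run, some v)

def solve_alt (A : List Int) (B : Int) (C : Int) : Int :=
  let vals := PySem.List.sorted (A.map (pvVal B C)) (fun x => x) false
  (vals.foldl pvStep (0, 0, none)).1

-- ===== PRECONDITION & SPEC =====
-- Pre_ excludes the inputs on which Python A raises: C = 0 (ZeroDivisionError) and A = [] (ValueError from max over an empty dict).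
def Pre_solve (A : List Int) (B : Int) (C : Int) : Prop := A ≠ [] ∧ C ≠ 0
instance (A : List Int) (B : Int) (C : Int) : Decidable (Pre_solve A B C) := by unfold Pre_solve; infer_instance
def pvWitness_solve : List Int × Int × Int := ([3, 5, 3], 2, 7)

def Spec_solve (A : List Int) (B : Int) (C : Int) (out : Int) : Prop := out = solve_alt A B C
instance (A : List Int) (B : Int) (C : Int) (out : Int) : Decidable (Spec_solve A B C out) := by unfold Spec_solve; infer_instance

-- ===== CLAIM (what is proved, stated in full; the proofs are below) =====
def Claim_equal_solve : Prop := ∀ (A : List Int) (B : Int) (C : Int), Dom_solve A B C → Pre_solve A B C → Spec_solve A B C (solve A B C)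

-- ===== LEMMAS AND PROOFS =====

-- A's counting loop is Counter(vals)
theorem pvDix_eq_counter (A : List Int) (B C : Int) :
    (A.foldl (fun d i =>
      let val := pvVal B C i
      if ((d.get? val).getD 0) ≠ 0 then d.insert val (d.getD val 0 + 1)
      else d.insert val 1) (PySem.Dict.empty : PySem.Dict Int Int))
    = PySem.Dict.counter (A.map (pvVal B C)) := by
  rw [← PySem.Dict.foldl_insert_getD_add_one_eq_counter, List.foldl_map]
  congr 1
  funext d i
  simp only []
  split
  · rfl
  · rename_i h
    have h0 : (d.getD (pvVal B C i) 0) = 0 := by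
      rw [PySem.Dict.getD_eq_get?_getD]; omega
    rw [h0]
    norm_num

-- scan invariants over a sorted tail
theorem pvScan_ge (ws : List Int) (b r : Int) (prev : Option Int)
    (hs : ws.Pairwise (· ≤ ·))
    (h1 : ∀ w ∈ ws, ∀ q, prev = some q → q ≤ w)
    (h2 : r ≤ b) (h3 : 0 ≤ b) :
    b ≤ (ws.foldl pvStep (b, r, prev)).1 ∧
    ∀ v : Int, (ws.count v : Int) + (if prev = some v then r else 0) ≤ (ws.foldl pvStep (b, r, prev)).1 := by
  induction ws generalizing b r prev with
  | nil =>
    refine ⟨le_refl _, fun v => ?_⟩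
    simp only [List.foldl_nil, List.count_nil]
    split <;> omega
  | cons w t ih =>
    have hpt : t.Pairwise (· ≤ ·) := hs.of_cons
    have hwle : ∀ x ∈ t, w ≤ x := (List.pairwise_cons.mp hs).1
    simp only [List.foldl_cons]
    by_cases hp : some w = prev
    · -- streak continues
      subst hp
      have hstep : pvStep (b, r, some w) w = (max b (r + 1), r + 1, some w) := by
        simp [pvStep]
      rw [hstep]
      obtain ⟨iha, ihb⟩ := ih (max b (r + 1)) (r + 1) (some w) hpt
        (by intro x hx q hq; cases hq; exact hwle x hx)
        (le_max_right _ _) (le_trans h3 (le_max_left _ _))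
      refine ⟨le_trans (le_max_left _ _) iha, fun v => ?_⟩
      have := ihb v
      by_cases hv : v = w
      · subst hv
        simp only [if_pos rfl] at this ⊢
        rw [List.count_cons_self]
        push_cast at this ⊢
        omega
      · have hne : ¬ (some w = some v) := by simpa using Ne.symm hv
        simp only [if_neg hne] at this ⊢
        rw [(by simp [List.count_cons, hv, Ne.symm hv] : (w :: t).count v = t.count v)]
        exact this
    · -- new value starts a run of 1
      have hstep : pvStep (b, r, prev) w = (max b 1, 1, some w) := by
        simp [pvStep, hp]
      rw [hstep]
      obtain ⟨iha, ihb⟩ := ih (max b 1) 1 (some w) hpt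
        (by intro x hx q hq; cases hq; exact hwle x hx)
        (le_max_right _ _) (le_trans h3 (le_max_left _ _))
      refine ⟨le_trans (le_max_left _ _) iha, fun v => ?_⟩
      have := ihb v
      by_cases hv : v = w
      · subst hv
        simp only [if_pos rfl] at this
        rw [List.count_cons_self]
        have hnp : ¬ (prev = some v) := fun h => hp h.symm
        simp only [if_neg hnp]
        push_cast at this ⊢
        omega
      · have hne : ¬ (some w = some v) := by simpa using Ne.symm hv
        simp only [if_neg hne] at this
        rw [(by simp [List.count_cons, hv, Ne.symm hv] : (w :: t).count v = t.count v)]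
        by_cases hpv : prev = some v
        · -- v < w, so v ∉ t
          have hcnt : t.count v = 0 := by
            rw [List.count_eq_zero]
            intro hvt
            have hl := h1 w (List.mem_cons_self) v hpv
            exact hv (le_antisymm hl (hwle v hvt))
          rw [hcnt]
          simp only [if_pos hpv]
          have hb : b ≤ (t.foldl pvStep (max b 1, 1, some w)).1 :=
            le_trans (le_max_left _ _) iha
          push_cast
          omega
        · simp only [if_neg hpv]
          exact this

-- the scan result is b or an achieved (count + carried-run) value
theorem pvScan_le (ws : List Int) (b r : Int) (prev : Option Int) (hr : 0 ≤ r) :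
    (ws.foldl pvStep (b, r, prev)).1 = b ∨
    ∃ v ∈ ws, (ws.foldl pvStep (b, r, prev)).1 ≤ (ws.count v : Int) + (if prev = some v then r else 0) := by
  induction ws generalizing b r prev with
  | nil => exact Or.inl rfl
  | cons w t ih =>
    simp only [List.foldl_cons]
    by_cases hp : some w = prev
    · subst hp
      have hstep : pvStep (b, r, some w) w = (max b (r + 1), r + 1, some w) := by
        simp [pvStep]
      rw [hstep]
      rcases ih (max b (r + 1)) (r + 1) (some w) (by omega) with h | ⟨v, hv, hle⟩
      · rw [h]
        by_cases hb : r + 1 ≤ b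
        · exact Or.inl (by omega)
        · refine Or.inr ⟨w, List.mem_cons_self, ?_⟩
          rw [List.count_cons_self, if_pos rfl]
          push_cast
          omega
      · by_cases hvw : v = w
        · subst hvw
          refine Or.inr ⟨v, List.mem_cons_self, ?_⟩
          simp only [if_pos rfl] at hle ⊢
          rw [List.count_cons_self]
          push_cast at hle ⊢
          omega
        · refine Or.inr ⟨v, List.mem_cons_of_mem _ hv, ?_⟩
          have hne : ¬ (some w = some v) := by simpa using Ne.symm hvw
          simp only [if_neg hne] at hle ⊢
          rw [(by simp [List.count_cons, hvw, Ne.symm hvw] : (w :: t).count v = t.count v)]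
          exact hle
    · have hstep : pvStep (b, r, prev) w = (max b 1, 1, some w) := by
        simp [pvStep, hp]
      rw [hstep]
      rcases ih (max b 1) 1 (some w) (by omega) with h | ⟨v, hv, hle⟩
      · rw [h]
        by_cases hb : (1 : Int) ≤ b
        · exact Or.inl (by omega)
        · refine Or.inr ⟨w, List.mem_cons_self, ?_⟩
          rw [List.count_cons_self]
          split <;> push_cast <;> omega
      · by_cases hvw : v = w
        · subst hvw
          refine Or.inr ⟨v, List.mem_cons_self, ?_⟩
          simp only [if_pos rfl] at hle
          rw [List.count_cons_self]
          split <;> push_cast at hle ⊢ <;> omega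
        · refine Or.inr ⟨v, List.mem_cons_of_mem _ hv, ?_⟩
          have hne : ¬ (some w = some v) := by simpa using Ne.symm hvw
          simp only [if_neg hne] at hle
          rw [(by simp [List.count_cons, hvw, Ne.symm hvw] : (w :: t).count v = t.count v)]
          split <;> push_cast at hle ⊢ <;> omega

-- ===== VERDICT (by name: the statement is the Claim_ definition above) =====
theorem solve_spec : Claim_equal_solve := by
  intro A B C _hdom hpre
  obtain ⟨hA, _hC⟩ := hpre
  unfold Spec_solve solve solve_alt
  simp only []
  rw [pvDix_eq_counter]
  set vs := A.map (pvVal B C) with hvs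
  have hvsne : vs ≠ [] := by
    simp only [hvs, ne_eq, List.map_eq_nil_iff]; exact hA
  set ws := PySem.List.sorted vs (fun x => x) false with hws
  have hperm : ws.Perm vs := PySem.List.sorted_perm vs _ false
  have hwsne : ws ≠ [] := by
    intro h
    exact hvsne ((PySem.List.sorted_eq_nil_iff vs (fun x => x) false).mp h)
  have hpw : ws.Pairwise (· ≤ ·) := PySem.List.sorted_pairwise vs (fun x => x)
  have hcnt : ∀ v : Int, ws.count v = vs.count v := fun v => hperm.count_eq v
  have hkeys : (PySem.Dict.counter vs).keys = PySem.Set.ofList vs := PySem.Dict.keys_counter vs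
  have hkeysne : (PySem.Dict.counter vs).keys ≠ [] := by
    rw [hkeys]
    obtain ⟨x, t, hxt⟩ := List.exists_cons_of_ne_nil hvsne
    rw [hxt]
    intro h
    have hx : x ∈ PySem.Set.ofList (x :: t) :=
      (PySem.Set.mem_ofList _ _).mpr List.mem_cons_self
    rw [h] at hx
    exact List.not_mem_nil hx
  obtain ⟨ans, hans⟩ : ∃ ans, PySem.List.max? (PySem.Dict.counter vs).keys
      (fun k => (PySem.Dict.counter vs).getD k 0) = some ans := by
    cases hmx : PySem.List.max? (PySem.Dict.counter vs).keys
        (fun k => (PySem.Dict.counter vs).getD k 0) with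
    | none => exact absurd ((PySem.List.max?_eq_none_iff _ _).mp hmx) hkeysne
    | some a => exact ⟨a, rfl⟩
  rw [hans]
  have hansmem : ans ∈ vs := by
    have hm := PySem.List.max?_mem hans
    rw [hkeys] at hm
    exact (PySem.Set.mem_ofList _ _).mp hm
  have hansmax : ∀ v ∈ vs, (vs.count v : Int) ≤ (vs.count ans : Int) := by
    intro v hv
    have hvk : v ∈ (PySem.Dict.counter vs).keys := by
      rw [hkeys]; exact (PySem.Set.mem_ofList _ _).mpr hv
    have hm := PySem.List.max?_isMax hans v hvk
    simpa [PySem.Dict.getD_counter] using hm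
  show (PySem.Dict.counter vs).getD ans 0 = (ws.foldl pvStep (0, 0, none)).1
  rw [PySem.Dict.getD_counter]
  obtain ⟨_, hge⟩ := pvScan_ge ws 0 0 none hpw (by intro _ _ q h; cases h) (le_refl 0) (le_refl 0)
  have hge' : ∀ v : Int, (ws.count v : Int) ≤ (ws.foldl pvStep (0, 0, none)).1 := by
    intro v; have hg := hge v; simpa using hg
  rcases pvScan_le ws 0 0 none (le_refl 0) with h0 | ⟨v, hv, hle⟩
  · -- impossible: ws nonempty forces best ≥ 1
    exfalso
    obtain ⟨x, t, hxt⟩ := List.exists_cons_of_ne_nil hwsne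
    have hg := hge' x
    rw [hxt, List.count_cons_self, ← hxt, h0] at hg
    push_cast at hg
    omega
  · have hle' : (ws.foldl pvStep (0, 0, none)).1 ≤ (ws.count v : Int) := by
      simpa using hle
    have hA1 : (vs.count ans : Int) ≤ (ws.foldl pvStep (0, 0, none)).1 := by
      rw [← hcnt ans]; exact hge' ans
    have hA2 : (ws.foldl pvStep (0, 0, none)).1 ≤ (vs.count ans : Int) := by
      refine le_trans hle' ?_
      rw [hcnt v]
      exact hansmax v (hperm.mem_iff.mp hv)
    omega
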